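-- pv_equiv track=rewrite | github.com/adienes/remainder-tree | archives/Pyfiles/integer_mockup_datastructure.py | remainder_tree
-- ===== SOURCE A (Python) =====
-- def remainder_tree(A, m):
-- 	N = len(A)
-- 	assert N == len(m)
--
-- 	if N == 0: #shouldn't really ever occur but this handles weird cases
-- 		return []
--
-- 	leftmost = 1 << N.bit_length()
-- 	# amazingly, total length of array (empty [0]) is 2^(lgN+1) + 2(N - 2^lgN) = 2*N (or via invariants)
-- 	ATree = [0]*2*N
-- 	mTree = [0]*2*N
-- 	CTree = [0]*2*N
--
-- 	# fill in the base values of A, m in the tree (the initial m[i] and the initial A[i])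
-- 	for i in range(leftmost, 2*N):
-- 		ATree[i] = A[i - leftmost]
-- 		mTree[i] = m[i - leftmost]
-- 	for i in range(N, leftmost):
-- 		ATree[i] = A[i + N-leftmost]
-- 		mTree[i] = m[i + N-leftmost]
--
-- 	# fill in the rest of the values in tree (the products of m[i] and A[i])
-- 	for i in range(N-1, 0, -1):
-- 		if not i & (i+1) == 0: # don't calculate A values for rightmost branch of tree (indices 2^j-1) since we don't need them
-- 			ATree[i] = ATree[2*i]*ATree[2*i+1]
-- 		mTree[i] = mTree[2*i]*mTree[2*i+1]
--
-- 	# computation of the modulos starting at the root with initial value 1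
-- 	CTree[1] = 1
-- 	for i in range(1, N):
-- 		CTree[2*i] = CTree[i] % mTree[2*i]
-- 		CTree[2*i+1] = (CTree[i] * ATree[2*i]) % mTree[2*i+1]
--
-- 	# initialize and set output
-- 	C = [0]*N
-- 	for i in range(leftmost, 2*N):
-- 		C[i - leftmost] = (CTree[i] * ATree[i]) % mTree[i]
-- 	for i in range(N, leftmost):
-- 		C[i + N-leftmost] = (CTree[i] * ATree[i]) % mTree[i]
--
-- 	return C
-- ===== SOURCE B (Python) =====
-- def remainder_tree(A, m):
--     N = len(A)
--     assert N == len(m)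
--     C = []
--     prod = 1
--     for a, mi in zip(A, m):
--         prod *= a
--         C.append(prod % mi)
--     return C
-- ===== Notes on version B (the rewrite author's own statement) =====
-- stated objective: simpler
-- what changed: Replaces the implicit segment tree (three size-2N heap-layout arrays filled by four index loops) with a single pass over zip(A, m) that keeps one running prefix product and reduces it modulo each m[i]; this is much shorter but gives up the tree's balanced big-integer multiplication pattern, so it is slower on very large inputs.
import Mathlib
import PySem

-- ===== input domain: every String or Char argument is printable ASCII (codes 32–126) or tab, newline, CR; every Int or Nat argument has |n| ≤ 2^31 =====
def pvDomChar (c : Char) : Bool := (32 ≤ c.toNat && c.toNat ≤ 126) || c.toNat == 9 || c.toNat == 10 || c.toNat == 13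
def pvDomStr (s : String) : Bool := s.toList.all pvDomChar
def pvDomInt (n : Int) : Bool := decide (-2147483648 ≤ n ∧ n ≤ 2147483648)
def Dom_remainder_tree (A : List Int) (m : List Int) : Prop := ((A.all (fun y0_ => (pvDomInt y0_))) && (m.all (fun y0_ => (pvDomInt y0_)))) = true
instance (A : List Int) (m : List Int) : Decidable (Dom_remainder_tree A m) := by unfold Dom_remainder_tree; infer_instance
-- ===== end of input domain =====

-- B is a simpler re-implementation: one pass with a running prefix product instead of the
-- implicit segment tree; equal to A on Pre_ (A's whole return domain).  Not faster: B gives up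
-- the tree's balanced multiplication pattern and is slower on very large inputs.

-- ===== PORT A =====
-- Literal transliteration of A.  All list indices A touches are provably in range and nonnegative
-- on inputs satisfying Pre_, so pyGetD/pySetD (the total in-range forms) are exact there.
def remainder_tree (A : List Int) (m : List Int) : List Int :=
  let N : Int := PySem.List.len A
  -- Python: `assert N == len(m)` — AssertionError inputs are excluded by Pre_
  if N = 0 then []
  else
    let leftmost : Int := 1 <<< PySem.Int.bitLength N
    -- [0]*2*N parses as ([0]*2)*N
    let ATree0 : List Int := PySem.List.pyRepeat (PySem.List.pyRepeat [(0 : Int)] 2) N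
    let mTree0 : List Int := PySem.List.pyRepeat (PySem.List.pyRepeat [(0 : Int)] 2) N
    let CTree0 : List Int := PySem.List.pyRepeat (PySem.List.pyRepeat [(0 : Int)] 2) N
    let st1 : List Int × List Int :=
      (PySem.List.pyRange leftmost (2*N) 1).foldl (fun st i =>
        (PySem.List.pySetD st.1 i (PySem.List.pyGetD A (i - leftmost) 0),
         PySem.List.pySetD st.2 i (PySem.List.pyGetD m (i - leftmost) 0))) (ATree0, mTree0)
    let st2 : List Int × List Int :=
      (PySem.List.pyRange N leftmost 1).foldl (fun st i =>
        (PySem.List.pySetD st.1 i (PySem.List.pyGetD A (i + N - leftmost) 0),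
         PySem.List.pySetD st.2 i (PySem.List.pyGetD m (i + N - leftmost) 0))) st1
    -- for i in range(N-1, 0, -1); `not i & (i+1) == 0` is `¬((i &&& (i+1)) == 0)`
    let st3 : List Int × List Int :=
      (PySem.List.pyRange (N-1) 0 (-1)).foldl (fun st i =>
        (if ¬ (PySem.Int.band i (i+1) = 0)
           then PySem.List.pySetD st.1 i
                  (PySem.List.pyGetD st.1 (2*i) 0 * PySem.List.pyGetD st.1 (2*i+1) 0)
           else st.1,
         PySem.List.pySetD st.2 i
           (PySem.List.pyGetD st.2 (2*i) 0 * PySem.List.pyGetD st.2 (2*i+1) 0))) st2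
    let ATree := st3.1
    let mTree := st3.2
    let CTree1 := PySem.List.pySetD CTree0 1 1
    let CTree2 :=
      (PySem.List.pyRange 1 N 1).foldl (fun C i =>
        let C' := PySem.List.pySetD C (2*i)
          (PySem.Int.mod (PySem.List.pyGetD C i 0) (PySem.List.pyGetD mTree (2*i) 0))
        PySem.List.pySetD C' (2*i+1)
          (PySem.Int.mod (PySem.List.pyGetD C' i 0 * PySem.List.pyGetD ATree (2*i) 0)
            (PySem.List.pyGetD mTree (2*i+1) 0))) CTree1
    let Cout0 : List Int := PySem.List.pyRepeat [(0 : Int)] N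
    let Cout1 :=
      (PySem.List.pyRange leftmost (2*N) 1).foldl (fun C i =>
        PySem.List.pySetD C (i - leftmost)
          (PySem.Int.mod (PySem.List.pyGetD CTree2 i 0 * PySem.List.pyGetD ATree i 0)
            (PySem.List.pyGetD mTree i 0))) Cout0
    let Cout2 :=
      (PySem.List.pyRange N leftmost 1).foldl (fun C i =>
        PySem.List.pySetD C (i + N - leftmost)
          (PySem.Int.mod (PySem.List.pyGetD CTree2 i 0 * PySem.List.pyGetD ATree i 0)
            (PySem.List.pyGetD mTree i 0))) Cout1
    Cout2

-- ===== PORT B =====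
-- Literal transliteration of B: one fold over zip(A, m) carrying (C, prod).
def remainder_tree_alt (A : List Int) (m : List Int) : List Int :=
  -- Python: `assert N == len(m)` — excluded by Pre_
  ((A.zip m).foldl (fun (st : List Int × Int) p =>
      let prod := st.2 * p.1
      (st.1 ++ [PySem.Int.mod prod p.2], prod)) ([], 1)).1

-- ===== PRECONDITION & SPEC =====
-- Pre_ is exactly A's return domain: A raises AssertionError when len(A) ≠ len(m) and
-- ZeroDivisionError when some modulus is 0 (B raises the same exceptions there).
def Pre_remainder_tree (A : List Int) (m : List Int) : Prop :=
  A.length = m.length ∧ ∀ x ∈ m, x ≠ 0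
instance (A : List Int) (m : List Int) : Decidable (Pre_remainder_tree A m) := by
  unfold Pre_remainder_tree; infer_instance
def pvWitness_remainder_tree : List Int × List Int := ([2, -3, 5, 7], [7, 4, -9, 10])
def Spec_remainder_tree (A : List Int) (m : List Int) (out : List Int) : Prop := out = remainder_tree_alt A m
instance (A : List Int) (m : List Int) (out : List Int) : Decidable (Spec_remainder_tree A m out) := by unfold Spec_remainder_tree; infer_instance

-- ===== CLAIM (what is proved, stated in full; the proofs are below) =====
def Claim_equal_remainder_tree : Prop := ∀ (A : List Int) (m : List Int), Dom_remainder_tree A m → Pre_remainder_tree A m → Spec_remainder_tree A m (remainder_tree A m)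

-- ===== LEMMAS AND PROOFS =====

lemma pvGetD_set (l : List Int) (i j : Nat) (v : Int) :
    (l.set i v).getD j 0 = if i = j ∧ i < l.length then v else l.getD j 0 := by
  by_cases h : i = j ∧ i < l.length
  · obtain ⟨rfl, h2⟩ := h
    simp [List.getD_eq_getElem?_getD, h2]
  · rw [if_neg h]
    by_cases hij : i = j
    · subst hij
      have hlen : l.length ≤ i := by
        by_contra hc; exact h ⟨rfl, by omega⟩
      have h1 : (l.set i v)[i]? = none := by
        rw [List.getElem?_eq_none_iff]; simpa using hlen
      have h2 : l[i]? = none := by rw [List.getElem?_eq_none_iff]; exact hlen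
      simp [List.getD_eq_getElem?_getD, h1, h2]
    · simp [List.getD_eq_getElem?_getD, hij]

lemma pvFoldl_length {β : Type} (body : List Int → β → List Int) (r : List β)
    (h : ∀ acc k, k ∈ r → (body acc k).length = acc.length) :
    ∀ l : List Int, (r.foldl body l).length = l.length := by
  induction r with
  | nil => intro l; rfl
  | cons x xs ih =>
    intro l
    simp only [List.foldl_cons]
    rw [ih (fun acc k hk => h acc k (List.mem_cons_of_mem _ hk)) (body l x),
      h l x List.mem_cons_self]

lemma pvGetD_foldl_set (V : Nat → Int) :
    ∀ (cnt s : Nat) (l : List Int) (k : Nat),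
    ((List.range' s cnt).foldl (fun acc i => acc.set i (V i)) l).getD k 0
      = if s ≤ k ∧ k < s + cnt ∧ k < l.length then V k else l.getD k 0 := by
  intro cnt
  induction cnt with
  | zero => intro s l k; simp only [List.range'_zero, List.foldl_nil]; rw [if_neg (by omega)]
  | succ c ih =>
    intro s l k
    rw [List.range'_succ, List.foldl_cons, ih]
    rw [List.length_set, pvGetD_set]
    by_cases hA : s ≤ k ∧ k < s + (c+1) ∧ k < l.length
    · rw [if_pos hA]
      by_cases hk : s + 1 ≤ k
      · rw [if_pos ⟨hk, by omega, hA.2.2⟩]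
      · have hks : s = k := by omega
        rw [if_neg (by omega), if_pos ⟨hks, by omega⟩]
        rw [hks]
    · rw [if_neg hA]
      rw [if_neg (by omega), if_neg (by omega)]

lemma pvGetD_foldl_set_sub (V : Nat → Int) (c : Nat) :
    ∀ (cnt s : Nat) (l : List Int) (k : Nat), c ≤ s →
    ((List.range' s cnt).foldl (fun acc i => acc.set (i - c) (V i)) l).getD k 0
      = if s ≤ k + c ∧ k + c < s + cnt ∧ k < l.length then V (k + c) else l.getD k 0 := by
  intro cnt
  induction cnt with
  | zero => intro s l k hc; simp only [List.range'_zero, List.foldl_nil]; rw [if_neg (by omega)]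
  | succ n ih =>
    intro s l k hc
    rw [List.range'_succ, List.foldl_cons, ih _ _ _ (by omega)]
    rw [List.length_set, pvGetD_set]
    by_cases hA : s ≤ k + c ∧ k + c < s + (n+1) ∧ k < l.length
    · rw [if_pos hA]
      by_cases hk : s + 1 ≤ k + c
      · rw [if_pos ⟨hk, by omega, hA.2.2⟩]
      · have hks : k + c = s := by omega
        rw [if_neg (by omega), if_pos ⟨by omega, by omega⟩, hks]
    · rw [if_neg hA]
      rw [if_neg (by omega), if_neg (by omega)]


-- Python % only depends on the residue class mod the (nonzero) divisor
lemma pvMod_modEq (a M : Int) : PySem.Int.mod a M ≡ a [ZMOD M] := by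
  rw [Int.modEq_iff_dvd]
  have h := PySem.Int.floordiv_mul_add_mod a M
  exact ⟨PySem.Int.floordiv a M, by linarith⟩

lemma pvMod_congr {a b M : Int} (hM : M ≠ 0) (h : a ≡ b [ZMOD M]) :
    PySem.Int.mod a M = PySem.Int.mod b M := by
  rcases lt_or_gt_of_ne hM with hneg | hpos
  · have h1 := PySem.Int.mod_neg_bounds a hneg
    have h2 := PySem.Int.mod_neg_bounds b hneg
    have hc : PySem.Int.mod a M ≡ PySem.Int.mod b M [ZMOD M] :=
      ((pvMod_modEq a M).trans h).trans (pvMod_modEq b M).symm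
    have hdvd : M ∣ (PySem.Int.mod b M - PySem.Int.mod a M) := Int.modEq_iff_dvd.mp hc
    have h0 : PySem.Int.mod b M - PySem.Int.mod a M = 0 := by
      refine Int.eq_zero_of_abs_lt_dvd ((Int.neg_dvd).mpr hdvd) ?_
      rw [abs_lt]; constructor <;> omega
    omega
  · rw [PySem.Int.mod_eq_emod_of_pos hpos, PySem.Int.mod_eq_emod_of_pos hpos]
    exact h

-- bit facts for the rightmost-branch test
lemma pvLand_even (a : Nat) : (2*a) &&& (2*a+1) = 2*a := by
  apply Nat.eq_of_testBit_eq
  intro i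
  rw [Nat.testBit_land]
  cases i with
  | zero =>
    rw [Nat.testBit_zero, Nat.testBit_zero]
    have : (2*a) % 2 = 0 := by omega
    simp [this]
  | succ i =>
    simp only [Nat.testBit_succ]
    have h1 : 2*a/2 = a := by omega
    have h2 : (2*a+1)/2 = a := by omega
    rw [h1, h2, Bool.and_self]

lemma pvLand_even_ne (a : Nat) (ha : 1 ≤ a) : (2*a) &&& (2*a+1) ≠ 0 := by
  rw [pvLand_even]; omega

lemma pvLand_odd_child (i : Nat) (h : i &&& (i+1) ≠ 0) : (2*i+1) &&& (2*i+2) ≠ 0 := by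
  have key : (2*i+1) &&& (2*i+2) = 2*(i &&& (i+1)) := by
    apply Nat.eq_of_testBit_eq
    intro b
    rw [Nat.testBit_land]
    cases b with
    | zero =>
      rw [Nat.testBit_zero, Nat.testBit_zero, Nat.testBit_zero]
      have h1 : (2*i+1) % 2 = 1 := by omega
      have h2 : (2*i+2) % 2 = 0 := by omega
      have h3 : (2*(i &&& (i+1))) % 2 = 0 := by omega
      simp [h1, h2, h3]
    | succ b =>
      simp only [Nat.testBit_succ]
      have h1 : (2*i+1)/2 = i := by omega
      have h2 : (2*i+2)/2 = i+1 := by omega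
      have h3 : (2*(i &&& (i+1)))/2 = i &&& (i+1) := by omega
      rw [h1, h2, h3, Nat.testBit_land]
  rw [key]
  omega


def pvBL (n : Nat) : Nat := PySem.Int.bitLength (n : Int)
def pvL (n : Nat) : Nat := 2 ^ pvBL n
def pvT (n : Nat) : Nat := 2*n - pvL n
def pvPos (n j : Nat) : Nat := if pvL n ≤ j then j - pvL n else j + n - pvL n
def pvF (n v : Nat) : Nat := if v ≤ pvT n then v else (v + pvT n) / 2

def pvTreeVal (x : List Int) (n j : Nat) : Int :=
  if h1 : n ≤ j then (if j < 2*n then x.getD (pvPos n j) 0 else 0)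
  else if h2 : j = 0 then 0
  else pvTreeVal x n (2*j) * pvTreeVal x n (2*j+1)
termination_by 2*n - j
decreasing_by all_goals omega

def pvSpecC (Aa mm : List Int) (n j : Nat) : Int :=
  if h0 : j = 0 then 0
  else if h1 : j = 1 then 1
  else if j % 2 = 0 then PySem.Int.mod (pvSpecC Aa mm n (j/2)) (pvTreeVal mm n j)
  else PySem.Int.mod (pvSpecC Aa mm n (j/2) * pvTreeVal Aa n (j-1)) (pvTreeVal mm n j)
termination_by j
decreasing_by all_goals omega

def pvP (x : List Int) (s c : Nat) : Int := ((List.range' s c).map (fun p => x.getD p 0)).prod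

lemma pvL_bounds (n : Nat) (hn : 1 ≤ n) : n < pvL n ∧ pvL n ≤ 2*n ∧ 1 ≤ pvBL n := by
  have h1 := PySem.Int.lt_two_pow_bitLength (n : Int)
  have h2 := PySem.Int.two_pow_bitLength_le (n : Int) (by exact_mod_cast (by omega : (n:Int) ≠ 0))
  rw [Int.natAbs_natCast] at h1 h2
  rw [show PySem.Int.bitLength ((n:Nat) : Int) = pvBL n from rfl] at h1 h2
  have hbl : 1 ≤ pvBL n := by
    by_contra hc
    have h0 : pvBL n = 0 := by omega
    rw [h0] at h1; simp at h1; omega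
  refine ⟨h1, ?_, hbl⟩
  have h3 : pvL n = 2 * 2 ^ (pvBL n - 1) := by
    unfold pvL; rw [← pow_succ']; congr 1; omega
  omega

lemma pvPow2_unique {d e j : Nat} (h1 : 2^d ≤ j) (h2 : j < 2^(d+1))
    (h3 : 2^e ≤ j) (h4 : j < 2^(e+1)) : d = e := by
  by_contra hne
  rcases Nat.lt_or_ge d e with h | h
  · have : 2^(d+1) ≤ 2^e := Nat.pow_le_pow_right (by norm_num) (by omega)
    omega
  · have : 2^(e+1) ≤ 2^d := Nat.pow_le_pow_right (by norm_num) (by omega)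
    omega

lemma pvF_mono (n : Nat) {v w : Nat} (h : v ≤ w) : pvF n v ≤ pvF n w := by
  unfold pvF; split_ifs <;> omega

lemma pvP_append (x : List Int) (s c1 c2 : Nat) :
    pvP x s c1 * pvP x (s+c1) c2 = pvP x s (c1+c2) := by
  unfold pvP
  rw [← List.prod_append, ← List.map_append]
  congr 2
  have h := List.range'_append (s := s) (m := c1) (n := c2) (step := 1)
  simpa using h

lemma pvP_one (x : List Int) (s : Nat) : pvP x s 1 = x.getD s 0 := by
  unfold pvP; simp

lemma pvP_zero (x : List Int) (s : Nat) : pvP x s 0 = 1 := by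
  unfold pvP; simp

lemma pvTreeVal_eq (x : List Int) (n : Nat) (hn : 1 ≤ n) :
    ∀ (fuel j d : Nat), 2*n - j ≤ fuel → 1 ≤ j → j < 2*n → 2^d ≤ j → j < 2^(d+1) →
    pvTreeVal x n j
      = pvP x (pvF n (j * 2^(pvBL n - d) - pvL n))
            (pvF n ((j+1) * 2^(pvBL n - d) - pvL n) - pvF n (j * 2^(pvBL n - d) - pvL n)) := by
  intro fuel
  induction fuel with
  | zero => intro j d h0 h1 h2 _ _; omega
  | succ f ih =>
    intro j d hf hj1 hj2 hd1 hd2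
    obtain ⟨hL1, hL2, hbl⟩ := pvL_bounds n hn
    by_cases hleaf : n ≤ j
    · rw [pvTreeVal, dif_pos hleaf, if_pos hj2]
      by_cases hjL : pvL n ≤ j
      · have hbig : j < 2^(pvBL n + 1) := by
          have : 2^(pvBL n + 1) = 2 * pvL n := by rw [pvL, pow_succ']
          omega
        have hd : d = pvBL n := pvPow2_unique hd1 hd2 hjL hbig
        subst hd
        simp only [Nat.sub_self, pow_zero, mul_one]
        have e1 : pvF n (j - pvL n) = j - pvL n := by
          unfold pvF pvT; rw [if_pos (by omega)]
        have e2 : pvF n (j + 1 - pvL n) = j + 1 - pvL n := by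
          unfold pvF pvT; rw [if_pos (by omega)]
        rw [e1, e2, show j + 1 - pvL n - (j - pvL n) = 1 from by omega, pvP_one]
        unfold pvPos; rw [if_pos hjL]
      · have hd : d = pvBL n - 1 := by
          refine pvPow2_unique hd1 hd2 ?_ ?_
          · calc 2^(pvBL n - 1) ≤ n := by
                  have := PySem.Int.two_pow_bitLength_le (n : Int) (by exact_mod_cast (by omega : (n:Int) ≠ 0))
                  rw [Int.natAbs_natCast] at this
                  exact this
              _ ≤ j := hleaf
          · rw [show pvBL n - 1 + 1 = pvBL n from by omega,
                show (2:Nat)^(pvBL n) = pvL n from rfl]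
            omega
        subst hd
        rw [show pvBL n - (pvBL n - 1) = 1 from by omega, pow_one]
        have e1 : pvF n (j * 2 - pvL n) = j + n - pvL n := by
          unfold pvF pvT; split_ifs <;> omega
        have e2 : pvF n ((j+1) * 2 - pvL n) = j + 1 + n - pvL n := by
          unfold pvF pvT; split_ifs <;> omega
        rw [e1, e2, show j + 1 + n - pvL n - (j + n - pvL n) = 1 from by omega, pvP_one]
        unfold pvPos; rw [if_neg hjL]
    · -- internal node
      have hjn : j < n := by omega
      have hdlt : d < pvBL n := by
        have hp : 2^d < 2^(pvBL n) := by
          calc 2^d ≤ j := hd1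
            _ < pvL n := by omega
            _ = 2^(pvBL n) := rfl
        exact (Nat.pow_lt_pow_iff_right (by norm_num)).mp hp
      have hE2 : 2^(pvBL n - d) = 2 * 2^(pvBL n - d - 1) := by
        rw [← pow_succ']; congr 1; omega
      set E := 2^(pvBL n - d - 1) with hE
      have hLE : pvL n = 2^(d+1) * E := by
        unfold pvL; rw [hE, ← pow_add]; congr 1; omega
      have hd1' : 2^(d+1) ≤ 2*j := by rw [pow_succ']; omega
      have hd2' : 2*j+1 < 2^(d+2) := by
        have : 2^(d+2) = 2*2^(d+1) := by rw [pow_succ']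
        omega
      have hex : 2^(pvBL n - (d+1)) = E := by rw [hE]; congr 1
      have hrec : pvTreeVal x n j = pvTreeVal x n (2*j) * pvTreeVal x n (2*j+1) := by
        conv_lhs => rw [pvTreeVal]
        rw [dif_neg hleaf, dif_neg (by omega : ¬ j = 0)]
      rw [hrec,
        ih (2*j) (d+1) (by omega) (by omega) (by omega) hd1' (by omega),
        ih (2*j+1) (d+1) (by omega) (by omega) (by omega) (by omega) hd2',
        hex, hE2]
      have h2jE : pvL n ≤ 2*j*E := by
        rw [hLE]
        have : 2^(d+1) * E ≤ (2*j) * E := Nat.mul_le_mul_right E hd1'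
        calc 2^(d+1)*E ≤ (2*j)*E := this
          _ = 2*j*E := by ring
      rw [show j * (2 * E) = 2*j*E from by ring,
          show (j+1) * (2 * E) = 2*j*E + 2*E from by ring,
          show (2*j) * E = 2*j*E from by ring,
          show (2*j+1) * E = 2*j*E + E from by ring,
          show (2*j+1+1) * E = 2*j*E + 2*E from by ring]
      set a := pvF n (2*j*E - pvL n) with ha
      set b := pvF n (2*j*E + E - pvL n) with hb
      set cc := pvF n (2*j*E + 2*E - pvL n) with hcc
      have hab : a ≤ b := pvF_mono n (by omega)
      have hbc : b ≤ cc := pvF_mono n (by omega)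
      rw [show cc - a = (b - a) + (cc - b) from by omega, ← pvP_append,
        show a + (b - a) = b from by omega]

lemma pvSpecC_modeq (Aa mm : List Int) (n : Nat) (hn : 1 ≤ n) :
    ∀ (j d : Nat), 1 ≤ j → j < 2*n → 2^d ≤ j → j < 2^(d+1) →
    Int.ModEq (pvTreeVal mm n j) (pvSpecC Aa mm n j)
      (pvP Aa 0 (pvF n (j * 2^(pvBL n - d) - pvL n))) := by
  intro j
  induction j using Nat.strong_induction_on with
  | _ j IH =>
    intro d hj1 hj2 hd1 hd2
    obtain ⟨hL1, hL2, hbl⟩ := pvL_bounds n hn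
    by_cases hj1' : j = 1
    · subst hj1'
      have hd0 : d = 0 := pvPow2_unique hd1 hd2 (by norm_num) (by norm_num)
      subst hd0
      rw [pvSpecC, dif_neg (by omega), dif_pos rfl]
      rw [show 1 * 2^(pvBL n - 0) - pvL n = 0 from by
        simp [pvL]]
      rw [show pvF n 0 = 0 from by unfold pvF; rw [if_pos (Nat.zero_le _)], pvP_zero]
    · -- j ≥ 2
      have hj2' : 2 ≤ j := by omega
      have hd0 : 1 ≤ d := by
        by_contra hc
        have : d = 0 := by omega
        subst this
        norm_num at hd2
        omega
      have hdble : d ≤ pvBL n := by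
        have h1 : 2^d < 2^(pvBL n + 1) := by
          calc 2^d ≤ j := hd1
            _ < 2*n := hj2
            _ ≤ 2*pvL n := by omega
            _ = 2^(pvBL n + 1) := by rw [pvL, pow_succ']
        have := (Nat.pow_lt_pow_iff_right (a := 2) (by norm_num)).mp h1
        omega
      have hpd : 2^d = 2*2^(d-1) := by rw [← pow_succ']; congr 1; omega
      have hpd2 : 2^(d+1) = 2*2^d := by rw [pow_succ']
      set i := j / 2 with hi
      have hi1 : 1 ≤ i := by omega
      have hij : i < j := by omega
      have hin : i < n := by omega
      have hdi1 : 2^(d-1) ≤ i := by omega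
      have hdi2 : i < 2^(d-1+1) := by rw [show d-1+1 = d from by omega]; omega
      have hex : 2^(pvBL n - (d-1)) = 2 * 2^(pvBL n - d) := by
        rw [← pow_succ']; congr 1; omega
      have hIH := IH i hij (d-1) hi1 (by omega) hdi1 hdi2
      rw [hex] at hIH
      have hparent : pvTreeVal mm n i = pvTreeVal mm n (2*i) * pvTreeVal mm n (2*i+1) := by
        conv_lhs => rw [pvTreeVal]
        rw [dif_neg (by omega : ¬ n ≤ i), dif_neg (by omega : ¬ i = 0)]
      by_cases hpar : j % 2 = 0
      · -- even child
        have hji : j = 2*i := by omega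
        have hdvd : pvTreeVal mm n j ∣ pvTreeVal mm n i := by
          rw [hparent, hji]; exact dvd_mul_right _ _
        rw [pvSpecC, dif_neg (by omega), dif_neg hj1', if_pos hpar]
        refine (pvMod_modEq _ _).trans ?_
        have h2 : pvSpecC Aa mm n i ≡ pvP Aa 0 (pvF n (i * (2 * 2^(pvBL n - d)) - pvL n))
            [ZMOD pvTreeVal mm n j] := hIH.of_dvd hdvd
        rw [show i * (2 * 2^(pvBL n - d)) = 2*i*2^(pvBL n - d) from by ring] at h2
        rw [← hji] at h2
        rw [hi] at h2
        exact h2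
      · -- odd child
        have hji : j = 2*i + 1 := by omega
        have hdvd : pvTreeVal mm n j ∣ pvTreeVal mm n i := by
          rw [hparent, hji]; exact dvd_mul_left _ _
        rw [pvSpecC, dif_neg (by omega), dif_neg hj1', if_neg hpar]
        have h2even : 2 ∣ 2^d := dvd_pow_self 2 (by omega)
        have hA := pvTreeVal_eq Aa n hn (2*n) (2*i) d (by omega) (by omega) (by omega)
          (by omega) (by omega)
        have hIH2 : pvSpecC Aa mm n i ≡ pvP Aa 0 (pvF n (2*i*2^(pvBL n - d) - pvL n))
            [ZMOD pvTreeVal mm n j] := by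
          have h2 := hIH.of_dvd hdvd
          rw [show i * (2 * 2^(pvBL n - d)) = 2*i*2^(pvBL n - d) from by ring] at h2
          exact h2
        refine (pvMod_modEq _ _).trans ?_
        rw [show j - 1 = 2*i from by omega, hA]
        have hmul := hIH2.mul_right
          (pvP Aa (pvF n (2*i * 2^(pvBL n - d) - pvL n))
            (pvF n ((2*i+1) * 2^(pvBL n - d) - pvL n) - pvF n (2*i * 2^(pvBL n - d) - pvL n)))
        refine hmul.trans ?_
        have hmono : pvF n (2*i * 2^(pvBL n - d) - pvL n) ≤ pvF n ((2*i+1) * 2^(pvBL n - d) - pvL n) := by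
          apply pvF_mono
          have : 2*i * 2^(pvBL n - d) ≤ (2*i+1) * 2^(pvBL n - d) :=
            Nat.mul_le_mul_right _ (by omega)
          omega
        rw [show (2*i) * 2^(pvBL n - d) = 2*i*2^(pvBL n - d) from by ring]
        have happ := pvP_append Aa 0 (pvF n (2*i*2^(pvBL n - d) - pvL n))
          (pvF n ((2*i+1) * 2^(pvBL n - d) - pvL n) - pvF n (2*i*2^(pvBL n - d) - pvL n))
        rw [Nat.zero_add] at happ
        rw [happ]
        rw [show pvF n (2*i*2^(pvBL n - d) - pvL n) +
              (pvF n ((2*i+1) * 2^(pvBL n - d) - pvL n) - pvF n (2*i*2^(pvBL n - d) - pvL n))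
              = pvF n ((2*i+1) * 2^(pvBL n - d) - pvL n) from by omega]
        rw [← hji]


lemma pvConvUp {σ : Type} (a b : Nat) (F : σ → Int → σ) (init : σ) :
    (PySem.List.pyRange (a : Int) (b : Int) 1).foldl F init
      = (List.range' a (b - a)).foldl (fun acc (k : Nat) => F acc (k : Int)) init := by
  conv_lhs => rw [PySem.List.pyRange_one, List.foldl_map]
  conv_rhs => rw [List.range'_eq_map_range, List.foldl_map]
  rw [show ((b : Int) - (a : Int)).toNat = b - a from by omega]
  apply PySem.List.foldl_congr_mem
  intro acc k _
  congr 1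

lemma pvConvDown {σ : Type} (n : Nat) (F : σ → Int → σ) (init : σ) :
    (PySem.List.pyRange ((n : Int) - 1) 0 (-1)).foldl F init
      = (List.range (n-1)).foldl (fun acc (k : Nat) => F acc (((n - 1 - k : Nat)) : Int)) init := by
  rw [PySem.List.pyRange_neg_one, List.foldl_map,
    show ((n : Int) - 1 - 0).toNat = n - 1 from by omega]
  apply PySem.List.foldl_congr_mem
  intro acc k hk
  rw [List.mem_range] at hk
  congr 1
  omega


lemma pvDownM (mm : List Int) (n : Nat) :
    ∀ (cnt : Nat) (l0 : List Int), cnt ≤ n - 1 → l0.length = 2*n →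
    (∀ j, n ≤ j → j < 2*n → l0.getD j 0 = pvTreeVal mm n j) →
    ∀ j, j < 2*n → (n - 1 - cnt) < j →
      ((List.range cnt).foldl
        (fun l (k : Nat) => l.set (n-1-k) (l.getD (2*(n-1-k)) 0 * l.getD (2*(n-1-k)+1) 0)) l0).getD j 0
        = pvTreeVal mm n j := by
  intro cnt
  induction cnt with
  | zero =>
    intro l0 hc hlen h0 j hj hjb
    simp only [List.range_zero, List.foldl_nil]
    exact h0 j (by omega) hj
  | succ c ih =>
    intro l0 hc hlen h0 j hj hjb
    rw [List.range_succ, List.foldl_append, List.foldl_cons, List.foldl_nil]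
    have hRlen : ((List.range c).foldl
        (fun l (k : Nat) => l.set (n-1-k) (l.getD (2*(n-1-k)) 0 * l.getD (2*(n-1-k)+1) 0)) l0).length = l0.length := by
      apply pvFoldl_length
      intro acc k _
      rw [List.length_set]
    set R := (List.range c).foldl
        (fun l (k : Nat) => l.set (n-1-k) (l.getD (2*(n-1-k)) 0 * l.getD (2*(n-1-k)+1) 0)) l0 with hR
    have hRc : ∀ j, j < 2*n → (n - 1 - c) < j → R.getD j 0 = pvTreeVal mm n j :=
      fun j hj hjb => ih l0 (by omega) hlen h0 j hj hjb
    rw [pvGetD_set]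
    by_cases hje : n-1-c = j
    · rw [if_pos ⟨hje, by omega⟩]
      set i := n-1-c with hidef
      have hi1 : 1 ≤ i := by omega
      have hin : i < n := by omega
      rw [hRc (2*i) (by omega) (by omega), hRc (2*i+1) (by omega) (by omega)]
      rw [hje]
      conv_rhs => rw [pvTreeVal]
      rw [dif_neg (by omega : ¬ n ≤ j), dif_neg (by omega : ¬ j = 0), ← hje]
    · rw [if_neg (by tauto)]
      exact hRc j hj (by omega)

lemma pvDownA (Aa : List Int) (n : Nat) :
    ∀ (cnt : Nat) (l0 : List Int), cnt ≤ n - 1 → l0.length = 2*n →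
    (∀ j, n ≤ j → j < 2*n → l0.getD j 0 = pvTreeVal Aa n j) →
    ∀ j, j < 2*n → (n - 1 - cnt) < j → (n ≤ j ∨ j &&& (j+1) ≠ 0) →
      ((List.range cnt).foldl
        (fun l (k : Nat) => if ¬((n-1-k) &&& ((n-1-k)+1) = 0)
          then l.set (n-1-k) (l.getD (2*(n-1-k)) 0 * l.getD (2*(n-1-k)+1) 0)
          else l) l0).getD j 0
        = pvTreeVal Aa n j := by
  intro cnt
  induction cnt with
  | zero =>
    intro l0 hc hlen h0 j hj hjb hgood
    simp only [List.range_zero, List.foldl_nil]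
    exact h0 j (by omega) hj
  | succ c ih =>
    intro l0 hc hlen h0 j hj hjb hgood
    rw [List.range_succ, List.foldl_append, List.foldl_cons, List.foldl_nil]
    have hRlen : ((List.range c).foldl
        (fun l (k : Nat) => if ¬((n-1-k) &&& ((n-1-k)+1) = 0)
          then l.set (n-1-k) (l.getD (2*(n-1-k)) 0 * l.getD (2*(n-1-k)+1) 0)
          else l) l0).length = l0.length := by
      apply pvFoldl_length
      intro acc k _
      split_ifs <;> simp [List.length_set]
    set R := (List.range c).foldl
        (fun l (k : Nat) => if ¬((n-1-k) &&& ((n-1-k)+1) = 0)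
          then l.set (n-1-k) (l.getD (2*(n-1-k)) 0 * l.getD (2*(n-1-k)+1) 0)
          else l) l0 with hR
    have hRc : ∀ j, j < 2*n → (n - 1 - c) < j → (n ≤ j ∨ j &&& (j+1) ≠ 0) →
        R.getD j 0 = pvTreeVal Aa n j :=
      fun j hj hjb hg => ih l0 (by omega) hlen h0 j hj hjb hg
    set i := n-1-c with hidef
    have hi1 : 1 ≤ i := by omega
    have hin : i < n := by omega
    by_cases hcond : ¬(i &&& (i+1) = 0)
    · rw [if_pos hcond, pvGetD_set]
      by_cases hje : i = j
      · rw [if_pos ⟨hje, by omega⟩]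
        have hg2i : (n ≤ 2*i ∨ (2*i) &&& (2*i+1) ≠ 0) := by
          right; exact pvLand_even_ne i hi1
        have hg2i1 : (n ≤ 2*i+1 ∨ (2*i+1) &&& ((2*i+1)+1) ≠ 0) := by
          by_cases hl : n ≤ 2*i+1
          · left; exact hl
          · right
            have := pvLand_odd_child i (by tauto)
            rw [show 2*i+1+1 = 2*i+2 from by omega]
            exact this
        rw [hRc (2*i) (by omega) (by omega) hg2i, hRc (2*i+1) (by omega) (by omega) hg2i1]
        rw [← hje]
        conv_rhs => rw [pvTreeVal]
        rw [dif_neg (by omega : ¬ n ≤ i), dif_neg (by omega : ¬ i = 0)]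
      · rw [if_neg (by tauto)]
        exact hRc j hj (by omega) hgood
    · rw [if_neg hcond]
      by_cases hje : i = j
      · exfalso
        rcases hgood with hg | hg
        · omega
        · rw [← hje] at hg; tauto
      · exact hRc j hj (by omega) hgood

lemma pvCLoop (Aa mm AT MT : List Int) (n : Nat) (hn : 1 ≤ n)
    (hMT : ∀ j, 1 ≤ j → j < 2*n → MT.getD j 0 = pvTreeVal mm n j)
    (hAT : ∀ j, 1 ≤ j → j < 2*n → (n ≤ j ∨ j &&& (j+1) ≠ 0) → AT.getD j 0 = pvTreeVal Aa n j) :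
    ∀ (cnt s : Nat) (l : List Int), 1 ≤ s → s + cnt ≤ n → l.length = 2*n →
    (∀ j, j < 2*n → l.getD j 0 = if j < 2*s then pvSpecC Aa mm n j else if j = 1 then 1 else 0) →
    ∀ j, j < 2*n →
    ((List.range' s cnt).foldl
      (fun C (k : Nat) =>
        (C.set (2*k) (PySem.Int.mod (C.getD k 0) (MT.getD (2*k) 0))).set (2*k+1)
          (PySem.Int.mod
            ((C.set (2*k) (PySem.Int.mod (C.getD k 0) (MT.getD (2*k) 0))).getD k 0 * AT.getD (2*k) 0)
            (MT.getD (2*k+1) 0))) l).getD j 0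
      = if j < 2*(s+cnt) then pvSpecC Aa mm n j else if j = 1 then 1 else 0 := by
  intro cnt
  induction cnt with
  | zero =>
    intro s l hs hsc hlen hchar j hj
    simp only [List.range'_zero, List.foldl_nil, Nat.add_zero]
    rw [hchar j hj]
  | succ c ih =>
    intro s l hs hsc hlen hchar j hj
    rw [List.range'_succ, List.foldl_cons]
    have hs2n : s < n := by omega
    have hgets : l.getD s 0 = pvSpecC Aa mm n s := by
      rw [hchar s (by omega), if_pos (by omega)]
    have hv1 : PySem.Int.mod (l.getD s 0) (MT.getD (2*s) 0) = pvSpecC Aa mm n (2*s) := by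
      rw [hgets, hMT (2*s) (by omega) (by omega)]
      conv_rhs => rw [pvSpecC]
      rw [dif_neg (by omega : ¬ 2*s = 0), dif_neg (by omega : ¬ 2*s = 1),
        if_pos (by omega : (2*s) % 2 = 0), show (2*s)/2 = s from by omega]
    have hv2 : PySem.Int.mod
        ((l.set (2*s) (PySem.Int.mod (l.getD s 0) (MT.getD (2*s) 0))).getD s 0 * AT.getD (2*s) 0)
        (MT.getD (2*s+1) 0) = pvSpecC Aa mm n (2*s+1) := by
      rw [pvGetD_set, if_neg (by omega)]
      rw [hgets, hMT (2*s+1) (by omega) (by omega),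
        hAT (2*s) (by omega) (by omega) (Or.inr (pvLand_even_ne s hs))]
      conv_rhs => rw [pvSpecC]
      rw [dif_neg (by omega : ¬ 2*s+1 = 0), dif_neg (by omega : ¬ 2*s+1 = 1),
        if_neg (by omega : ¬ (2*s+1) % 2 = 0), show (2*s+1)/2 = s from by omega,
        show 2*s+1-1 = 2*s from by omega]
    have hlen2 : ((l.set (2*s) (PySem.Int.mod (l.getD s 0) (MT.getD (2*s) 0))).set (2*s+1)
        (PySem.Int.mod
          ((l.set (2*s) (PySem.Int.mod (l.getD s 0) (MT.getD (2*s) 0))).getD s 0 * AT.getD (2*s) 0)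
          (MT.getD (2*s+1) 0))).length = 2*n := by
      simp [List.length_set, hlen]
    have hchar2 : ∀ j, j < 2*n →
        ((l.set (2*s) (PySem.Int.mod (l.getD s 0) (MT.getD (2*s) 0))).set (2*s+1)
          (PySem.Int.mod
            ((l.set (2*s) (PySem.Int.mod (l.getD s 0) (MT.getD (2*s) 0))).getD s 0 * AT.getD (2*s) 0)
            (MT.getD (2*s+1) 0))).getD j 0
          = if j < 2*(s+1) then pvSpecC Aa mm n j else if j = 1 then 1 else 0 := by
      intro j hj
      rw [pvGetD_set, List.length_set]
      by_cases hj1 : 2*s+1 = j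
      · rw [if_pos ⟨hj1, by omega⟩, hv2, hj1, if_pos (by omega)]
      · rw [if_neg (by tauto), pvGetD_set]
        by_cases hj0 : 2*s = j
        · rw [if_pos ⟨hj0, by omega⟩, hv1, hj0, if_pos (by omega)]
        · rw [if_neg (by tauto), hchar j hj]
          by_cases hlt : j < 2*s
          · rw [if_pos hlt, if_pos (by omega)]
          · have h1 : ¬ j = 1 := by omega
            have h2 : ¬ j < 2*(s+1) := by omega
            rw [if_neg hlt, if_neg h1, if_neg h2]
    rw [ih (s+1) _ (by omega) (by omega) hlen2 hchar2 j hj]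
    simp only [show s + 1 + c = s + (c+1) from by omega]

def pvAltGo (l : List (Int × Int)) (pr : Int) : List Int :=
  match l with
  | [] => []
  | (a, mi) :: rest => PySem.Int.mod (pr * a) mi :: pvAltGo rest (pr * a)

lemma pvAlt_fold (l : List (Int × Int)) : ∀ (acc : List Int) (pr : Int),
    (l.foldl (fun (st : List Int × Int) p =>
      (st.1 ++ [PySem.Int.mod (st.2 * p.1) p.2], st.2 * p.1)) (acc, pr)).1
      = acc ++ pvAltGo l pr := by
  induction l with
  | nil => intro acc pr; simp [pvAltGo]
  | cons p rest ih =>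
    intro acc pr
    rw [List.foldl_cons, ih]
    cases p with
    | mk a mi => simp [pvAltGo]

lemma pvAltGo_length (l : List (Int × Int)) : ∀ pr, (pvAltGo l pr).length = l.length := by
  induction l with
  | nil => intro pr; rfl
  | cons p rest ih =>
    intro pr
    cases p with
    | mk a mi => simp [pvAltGo, ih]

lemma pvAltGo_getElem (l : List (Int × Int)) : ∀ (pr : Int) (j : Nat) (hj : j < l.length),
    (pvAltGo l pr)[j]'(by rw [pvAltGo_length]; exact hj)
      = PySem.Int.mod (pr * ((l.take (j+1)).map Prod.fst).prod) ((l[j]'hj).2) := by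
  induction l with
  | nil => intro pr j hj; simp at hj
  | cons p rest ih =>
    intro pr j hj
    cases p with
    | mk a mi =>
      cases j with
      | zero => simp [pvAltGo]
      | succ j =>
        have hj' : j < rest.length := by simpa using hj
        simp only [pvAltGo, List.getElem_cons_succ, List.take_succ_cons, List.map_cons,
          List.prod_cons]
        rw [ih (pr * a) j hj']
        congr 1
        ring

lemma pvRepeat_two (n : Nat) :
    PySem.List.pyRepeat (PySem.List.pyRepeat [(0 : Int)] 2) ((n : Nat) : Int)
      = List.replicate (2*n) 0 := by
  show (List.replicate ((n : Int)).toNat (PySem.List.pyRepeat [(0:Int)] 2)).flatten = _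
  rw [show PySem.List.pyRepeat [(0:Int)] 2 = [0, 0] from rfl,
    show ((n : Int)).toNat = n from by omega]
  induction n with
  | zero => rfl
  | succ k ihk =>
    rw [List.replicate_succ, List.flatten_cons, ihk,
      show 2*(k+1) = 2 + 2*k from by omega, List.replicate_add]
    rfl

lemma pvRepeat_one (n : Nat) :
    PySem.List.pyRepeat [(0 : Int)] ((n : Nat) : Int) = List.replicate n 0 := by
  show (List.replicate ((n : Int)).toNat [(0:Int)]).flatten = _
  rw [show ((n : Int)).toNat = n from by omega]
  induction n with
  | zero => rfl
  | succ k ihk =>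
    rw [List.replicate_succ, List.flatten_cons, ihk, List.replicate_succ]
    rfl

lemma pvTake_eq (x : List Int) (k : Nat) (hk : k ≤ x.length) :
    x.take k = (List.range' 0 k).map (fun q => x.getD q 0) := by
  apply List.ext_getElem
  · simp [List.length_take]; omega
  · intro i h1 h2
    simp only [List.getElem_take, List.getElem_map, List.getElem_range']
    have hi : i < x.length := by simp [List.length_take] at h1; omega
    rw [List.getD_eq_getElem x 0 (by simpa using hi)]
    congr 1
    omega

lemma pvConvUp1 {σ : Type} (b : Nat) (F : σ → Int → σ) (init : σ) :
    (PySem.List.pyRange 1 (b : Int) 1).foldl F init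
      = (List.range' 1 (b - 1)).foldl (fun acc (k : Nat) => F acc (k : Int)) init := by
  have h := pvConvUp 1 b F init
  simpa using h

-- a write loop 'for i in range(a, b): l[w(i)] = v(i)' in Int form equals its Nat form
lemma pvDownConvA (n : Nat) (st0A : List Int) :
    ((PySem.List.pyRange ((n : Int) - 1) 0 (-1)).foldl (fun l i =>
        if ¬ (PySem.Int.band i (i+1) = 0)
          then PySem.List.pySetD l i
                 (PySem.List.pyGetD l (2*i) 0 * PySem.List.pyGetD l (2*i+1) 0)
          else l) st0A)
      = (List.range (n-1)).foldl
          (fun l (k : Nat) => if ¬((n-1-k) &&& ((n-1-k)+1) = 0)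
            then l.set (n-1-k) (l.getD (2*(n-1-k)) 0 * l.getD (2*(n-1-k)+1) 0)
            else l) st0A := by
  rw [pvConvDown n]
  apply PySem.List.foldl_congr_mem
  intro acc k _
  set j := n - 1 - k with hj
  have c1 : ((j : Nat) : Int) + 1 = ((j + 1 : Nat) : Int) := by push_cast; ring
  have c2 : 2 * ((j : Nat) : Int) = ((2*j : Nat) : Int) := by push_cast; ring
  have c3 : 2 * ((j : Nat) : Int) + 1 = ((2*j+1 : Nat) : Int) := by push_cast; ring
  rw [c1, c3, c2, PySem.Int.band_natCast]
  simp only [PySem.List.pySetD_natCast, PySem.List.pyGetD_natCast, Nat.cast_eq_zero]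

lemma pvDownConvM (n : Nat) (st0M : List Int) :
    ((PySem.List.pyRange ((n : Int) - 1) 0 (-1)).foldl (fun l i =>
        PySem.List.pySetD l i
          (PySem.List.pyGetD l (2*i) 0 * PySem.List.pyGetD l (2*i+1) 0)) st0M)
      = (List.range (n-1)).foldl
          (fun l (k : Nat) =>
            l.set (n-1-k) (l.getD (2*(n-1-k)) 0 * l.getD (2*(n-1-k)+1) 0)) st0M := by
  rw [pvConvDown n]
  apply PySem.List.foldl_congr_mem
  intro acc k _
  set j := n - 1 - k with hj
  have c2 : 2 * ((j : Nat) : Int) = ((2*j : Nat) : Int) := by push_cast; ring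
  have c3 : 2 * ((j : Nat) : Int) + 1 = ((2*j+1 : Nat) : Int) := by push_cast; ring
  rw [c3, c2]
  simp only [PySem.List.pySetD_natCast, PySem.List.pyGetD_natCast]

lemma pvCConv (AT MT : List Int) (n : Nat) (l : List Int) :
    ((PySem.List.pyRange 1 (n : Int) 1).foldl (fun C i =>
        PySem.List.pySetD
          (PySem.List.pySetD C (2*i)
            (PySem.Int.mod (PySem.List.pyGetD C i 0) (PySem.List.pyGetD MT (2*i) 0)))
          (2*i+1)
          (PySem.Int.mod
            (PySem.List.pyGetD
              (PySem.List.pySetD C (2*i)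
                (PySem.Int.mod (PySem.List.pyGetD C i 0) (PySem.List.pyGetD MT (2*i) 0))) i 0
              * PySem.List.pyGetD AT (2*i) 0)
            (PySem.List.pyGetD MT (2*i+1) 0))) l)
      = (List.range' 1 (n-1)).foldl
          (fun C (k : Nat) =>
            (C.set (2*k) (PySem.Int.mod (C.getD k 0) (MT.getD (2*k) 0))).set (2*k+1)
              (PySem.Int.mod
                ((C.set (2*k) (PySem.Int.mod (C.getD k 0) (MT.getD (2*k) 0))).getD k 0
                  * AT.getD (2*k) 0)
                (MT.getD (2*k+1) 0))) l := by
  rw [pvConvUp1 n]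
  apply PySem.List.foldl_congr_mem
  intro acc k _
  have c2 : 2 * ((k : Nat) : Int) = ((2*k : Nat) : Int) := by push_cast; ring
  have c3 : 2 * ((k : Nat) : Int) + 1 = ((2*k+1 : Nat) : Int) := by push_cast; ring
  rw [c3, c2]
  simp only [PySem.List.pySetD_natCast, PySem.List.pyGetD_natCast]

lemma pvOut_getD (Aa mm CT AT MT : List Int) (n : Nat) (hn : 1 ≤ n)
    (hmlen : mm.length = n) (hm : ∀ y ∈ mm, y ≠ 0)
    (hCT : ∀ j, j < 2*n → CT.getD j 0 = pvSpecC Aa mm n j)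
    (hAT : ∀ j, 1 ≤ j → j < 2*n → (n ≤ j ∨ j &&& (j+1) ≠ 0) → AT.getD j 0 = pvTreeVal Aa n j)
    (hMT : ∀ j, 1 ≤ j → j < 2*n → MT.getD j 0 = pvTreeVal mm n j) :
    ∀ p, p < n →
    ((List.range' n (pvL n - n)).foldl
        (fun acc k => acc.set (k - (pvL n - n))
          (PySem.Int.mod (CT.getD k 0 * AT.getD k 0) (MT.getD k 0)))
      ((List.range' (pvL n) (2*n - pvL n)).foldl
        (fun acc k => acc.set (k - pvL n)
          (PySem.Int.mod (CT.getD k 0 * AT.getD k 0) (MT.getD k 0)))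
        (List.replicate n (0 : Int)))).getD p 0
      = PySem.Int.mod (pvP Aa 0 (p+1)) (mm.getD p 0) := by
  intro p hp
  obtain ⟨hL1, hL2, hbl⟩ := pvL_bounds n hn
  have hlow : 2^(pvBL n - 1) ≤ n := by
    have h := PySem.Int.two_pow_bitLength_le (n : Int) (by exact_mod_cast (by omega : (n:Int) ≠ 0))
    rw [Int.natAbs_natCast] at h
    exact h
  have hinlen : ((List.range' (pvL n) (2*n - pvL n)).foldl
      (fun acc k => acc.set (k - pvL n)
        (PySem.Int.mod (CT.getD k 0 * AT.getD k 0) (MT.getD k 0)))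
      (List.replicate n (0 : Int))).length = n := by
    rw [pvFoldl_length _ _ (fun acc k _ => List.length_set ..), List.length_replicate]
  rw [pvGetD_foldl_set_sub _ (pvL n - n) _ _ _ _ (by omega)]
  rw [hinlen]
  -- key leaf computation, shared by the two cases
  have main : ∀ i : Nat, n ≤ i → i < 2*n → pvPos n i = p →
      PySem.Int.mod (CT.getD i 0 * AT.getD i 0) (MT.getD i 0)
        = PySem.Int.mod (pvP Aa 0 (p+1)) (mm.getD p 0) := by
    intro i hi1 hi2 hipos
    have hleafA : pvTreeVal Aa n i = Aa.getD p 0 := by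
      rw [pvTreeVal, dif_pos hi1, if_pos hi2, hipos]
    have hleafM : pvTreeVal mm n i = mm.getD p 0 := by
      rw [pvTreeVal, dif_pos hi1, if_pos hi2, hipos]
    have hm0 : mm.getD p 0 ≠ 0 := by
      rw [List.getD_eq_getElem mm 0 (by omega)]
      exact hm _ (List.getElem_mem _)
    have hmodeq : Int.ModEq (mm.getD p 0) (pvSpecC Aa mm n i) (pvP Aa 0 p) := by
      by_cases hiL : pvL n ≤ i
      · have h1 := pvSpecC_modeq Aa mm n hn i (pvBL n) (by omega) hi2
          (by rw [show (2:Nat)^(pvBL n) = pvL n from rfl]; omega)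
          (by rw [pow_succ, show (2:Nat)^(pvBL n) = pvL n from rfl]; omega)
        rw [Nat.sub_self, pow_zero, mul_one] at h1
        rw [show pvF n (i - pvL n) = p from ?_] at h1
        · rw [← hleafM]; exact h1
        · unfold pvF pvT pvPos at *
          split_ifs at * <;> omega
      · have h1 := pvSpecC_modeq Aa mm n hn i (pvBL n - 1) (by omega) hi2
          (by omega)
          (by rw [show pvBL n - 1 + 1 = pvBL n from by omega,
                show (2:Nat)^(pvBL n) = pvL n from rfl]; omega)
        rw [show pvBL n - (pvBL n - 1) = 1 from by omega, pow_one] at h1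
        rw [show pvF n (i * 2 - pvL n) = p from ?_] at h1
        · rw [← hleafM]; exact h1
        · unfold pvF pvT pvPos at *
          split_ifs at * <;> omega
    rw [hCT i hi2, hAT i (by omega) hi2 (Or.inl hi1), hMT i (by omega) hi2,
      hleafA, hleafM]
    have hchain := pvMod_congr hm0 (hmodeq.mul_right (Aa.getD p 0))
    rw [hchain]
    congr 1
    have happ := pvP_append Aa 0 p 1
    rw [Nat.zero_add] at happ
    rw [← happ, pvP_one]
  by_cases hcase : 2*n - pvL n ≤ p
  · -- written by the second loop (tree indices [n, pvL n))
    rw [if_pos ⟨by omega, by omega, hp⟩]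
    exact main (p + (pvL n - n)) (by omega) (by omega)
      (by unfold pvPos; split_ifs <;> omega)
  · -- untouched by the second loop, written by the first (tree indices [pvL n, 2n))
    rw [if_neg (by omega)]
    rw [pvGetD_foldl_set_sub _ (pvL n) _ _ _ _ (by omega), List.length_replicate]
    rw [if_pos ⟨by omega, by omega, hp⟩]
    exact main (p + pvL n) (by omega) (by omega)
      (by unfold pvPos; split_ifs <;> omega)

lemma pvAlt_char (Aa mm : List Int) (hl : Aa.length = mm.length) :
    (remainder_tree_alt Aa mm).length = Aa.length ∧
    ∀ (p : Nat) (hp : p < Aa.length),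
      (remainder_tree_alt Aa mm)[p]'(by rw [remainder_tree_alt, pvAlt_fold]; simpa [pvAltGo_length, hl] using hp)
        = PySem.Int.mod (pvP Aa 0 (p+1)) (mm.getD p 0) := by
  have hzlen : (Aa.zip mm).length = Aa.length := by rw [List.length_zip]; omega
  constructor
  · rw [remainder_tree_alt, pvAlt_fold, List.nil_append, pvAltGo_length, hzlen]
  · intro p hp
    have hpz : p < (Aa.zip mm).length := by omega
    have hgoal := pvAltGo_getElem (Aa.zip mm) 1 p hpz
    have he : (remainder_tree_alt Aa mm)[p]'(by rw [remainder_tree_alt, pvAlt_fold]; simpa [pvAltGo_length, hl] using hp)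
        = (pvAltGo (Aa.zip mm) 1)[p]'(by rw [pvAltGo_length]; omega) := by
      congr 1
      rw [remainder_tree_alt, pvAlt_fold, List.nil_append]
    rw [he, hgoal]
    rw [List.getElem_zip]
    have hmap : ((Aa.zip mm).take (p+1)).map Prod.fst = Aa.take (p+1) := by
      rw [List.map_take, List.map_fst_zip (by omega : Aa.length ≤ mm.length)]
    rw [hmap, pvTake_eq Aa (p+1) (by omega), one_mul]
    rw [List.getD_eq_getElem mm 0 (by omega)]
    rfl

lemma pvConvBase1 (x : List Int) (n : Nat) (l : List Int) :
    ((PySem.List.pyRange ((pvL n : Nat) : Int) ((2*n : Nat) : Int) 1).foldl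
        (fun acc i => PySem.List.pySetD acc i
          (PySem.List.pyGetD x (i - ((pvL n : Nat) : Int)) 0)) l)
      = (List.range' (pvL n) (2*n - pvL n)).foldl
          (fun acc (k : Nat) => acc.set k (x.getD (k - pvL n) 0)) l := by
  rw [pvConvUp (pvL n) (2*n)]
  apply PySem.List.foldl_congr_mem
  intro acc k hk
  rw [List.mem_range'_1] at hk
  rw [show ((k : Nat) : Int) - ((pvL n : Nat) : Int) = ((k - pvL n : Nat) : Int) from by omega]
  simp only [PySem.List.pySetD_natCast, PySem.List.pyGetD_natCast]

lemma pvConvBase2 (x : List Int) (n : Nat) (hn : 1 ≤ n) (l : List Int) :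
    ((PySem.List.pyRange ((n : Nat) : Int) ((pvL n : Nat) : Int) 1).foldl
        (fun acc i => PySem.List.pySetD acc i
          (PySem.List.pyGetD x (i + ((n : Nat) : Int) - ((pvL n : Nat) : Int)) 0)) l)
      = (List.range' n (pvL n - n)).foldl
          (fun acc (k : Nat) => acc.set k (x.getD (k + n - pvL n) 0)) l := by
  rw [pvConvUp n (pvL n)]
  apply PySem.List.foldl_congr_mem
  intro acc k hk
  rw [List.mem_range'_1] at hk
  rw [show ((k : Nat) : Int) + ((n : Nat) : Int) - ((pvL n : Nat) : Int)
        = ((k + n - pvL n : Nat) : Int) from by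
      have h2 : pvL n ≤ 2*n := (pvL_bounds n hn).2.1
      omega]
  simp only [PySem.List.pySetD_natCast, PySem.List.pyGetD_natCast]

lemma pvConvOut1 (CT AT MT : List Int) (n : Nat) (l : List Int) :
    ((PySem.List.pyRange ((pvL n : Nat) : Int) ((2*n : Nat) : Int) 1).foldl
        (fun acc i => PySem.List.pySetD acc (i - ((pvL n : Nat) : Int))
          (PySem.Int.mod (PySem.List.pyGetD CT i 0 * PySem.List.pyGetD AT i 0)
            (PySem.List.pyGetD MT i 0))) l)
      = (List.range' (pvL n) (2*n - pvL n)).foldl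
          (fun acc (k : Nat) => acc.set (k - pvL n)
            (PySem.Int.mod (CT.getD k 0 * AT.getD k 0) (MT.getD k 0))) l := by
  rw [pvConvUp (pvL n) (2*n)]
  apply PySem.List.foldl_congr_mem
  intro acc k hk
  rw [List.mem_range'_1] at hk
  rw [show ((k : Nat) : Int) - ((pvL n : Nat) : Int) = ((k - pvL n : Nat) : Int) from by omega]
  simp only [PySem.List.pySetD_natCast, PySem.List.pyGetD_natCast]

lemma pvConvOut2 (CT AT MT : List Int) (n : Nat) (hn : 1 ≤ n) (l : List Int) :
    ((PySem.List.pyRange ((n : Nat) : Int) ((pvL n : Nat) : Int) 1).foldl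
        (fun acc i => PySem.List.pySetD acc (i + ((n : Nat) : Int) - ((pvL n : Nat) : Int))
          (PySem.Int.mod (PySem.List.pyGetD CT i 0 * PySem.List.pyGetD AT i 0)
            (PySem.List.pyGetD MT i 0))) l)
      = (List.range' n (pvL n - n)).foldl
          (fun acc (k : Nat) => acc.set (k - (pvL n - n))
            (PySem.Int.mod (CT.getD k 0 * AT.getD k 0) (MT.getD k 0))) l := by
  rw [pvConvUp n (pvL n)]
  apply PySem.List.foldl_congr_mem
  intro acc k hk
  rw [List.mem_range'_1] at hk
  have h2 : pvL n ≤ 2*n := (pvL_bounds n hn).2.1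
  rw [show ((k : Nat) : Int) + ((n : Nat) : Int) - ((pvL n : Nat) : Int)
        = ((k - (pvL n - n) : Nat) : Int) from by omega]
  simp only [PySem.List.pySetD_natCast, PySem.List.pyGetD_natCast]

-- the A-side pipeline, written as plain Nat-indexed folds (proved equal to the port below)
def pvBaseL (x : List Int) (n : Nat) : List Int :=
  (List.range' n (pvL n - n)).foldl (fun acc k => acc.set k (x.getD (k + n - pvL n) 0))
    ((List.range' (pvL n) (2*n - pvL n)).foldl (fun acc k => acc.set k (x.getD (k - pvL n) 0))
      (List.replicate (2*n) 0))

def pvDownL (x : List Int) (n : Nat) : List Int :=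
  (List.range (n-1)).foldl
    (fun l k => l.set (n-1-k) (l.getD (2*(n-1-k)) 0 * l.getD (2*(n-1-k)+1) 0)) (pvBaseL x n)

def pvDownLA (x : List Int) (n : Nat) : List Int :=
  (List.range (n-1)).foldl
    (fun l k => if ¬((n-1-k) &&& ((n-1-k)+1) = 0)
      then l.set (n-1-k) (l.getD (2*(n-1-k)) 0 * l.getD (2*(n-1-k)+1) 0) else l) (pvBaseL x n)

def pvCL (Aa mm : List Int) (n : Nat) : List Int :=
  (List.range' 1 (n-1)).foldl
    (fun C k =>
      (C.set (2*k) (PySem.Int.mod (C.getD k 0) ((pvDownL mm n).getD (2*k) 0))).set (2*k+1)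
        (PySem.Int.mod
          ((C.set (2*k) (PySem.Int.mod (C.getD k 0) ((pvDownL mm n).getD (2*k) 0))).getD k 0
            * (pvDownLA Aa n).getD (2*k) 0)
          ((pvDownL mm n).getD (2*k+1) 0)))
    ((List.replicate (2*n) 0).set 1 1)

def pvOutL (Aa mm : List Int) (n : Nat) : List Int :=
  (List.range' n (pvL n - n)).foldl
    (fun acc k => acc.set (k - (pvL n - n))
      (PySem.Int.mod ((pvCL Aa mm n).getD k 0 * (pvDownLA Aa n).getD k 0)
        ((pvDownL mm n).getD k 0)))
    ((List.range' (pvL n) (2*n - pvL n)).foldl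
      (fun acc k => acc.set (k - pvL n)
        (PySem.Int.mod ((pvCL Aa mm n).getD k 0 * (pvDownLA Aa n).getD k 0)
          ((pvDownL mm n).getD k 0)))
      (List.replicate n 0))

lemma pvPort_eq (Aa mm : List Int) (n : Nat) (hn : 1 ≤ n) (hA : Aa.length = n) :
    remainder_tree Aa mm = pvOutL Aa mm n := by
  have hsh : (((1 <<< PySem.Int.bitLength ((n : Nat) : Int) : Nat)) : Int)
      = ((pvL n : Nat) : Int) := by
    rw [Nat.one_shiftLeft]
    rfl
  have h2n : (2 : Int) * ((n : Nat) : Int) = ((2*n : Nat) : Int) := by push_cast; ring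
  have hset1 : PySem.List.pySetD (List.replicate (2*n) (0:Int)) 1 1
      = (List.replicate (2*n) (0:Int)).set 1 1 := by
    rw [PySem.List.pySetD_of_nonneg _ _ (by norm_num)]
    rfl
  simp only [remainder_tree, PySem.List.len_eq, hA]
  rw [if_neg (by omega : ¬ ((n : Nat) : Int) = 0)]
  rw [hsh, h2n, pvRepeat_two n, pvRepeat_one n, hset1]
  rw [PySem.List.foldl_prod_mk
    (f := fun l i => PySem.List.pySetD l i (PySem.List.pyGetD Aa (i - ((pvL n : Nat) : Int)) 0))
    (g := fun l i => PySem.List.pySetD l i (PySem.List.pyGetD mm (i - ((pvL n : Nat) : Int)) 0))]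
  rw [PySem.List.foldl_prod_mk
    (f := fun l i => PySem.List.pySetD l i
      (PySem.List.pyGetD Aa (i + ((n : Nat) : Int) - ((pvL n : Nat) : Int)) 0))
    (g := fun l i => PySem.List.pySetD l i
      (PySem.List.pyGetD mm (i + ((n : Nat) : Int) - ((pvL n : Nat) : Int)) 0))]
  rw [PySem.List.foldl_prod_mk
    (f := fun l i => if ¬ (PySem.Int.band i (i+1) = 0)
      then PySem.List.pySetD l i
        (PySem.List.pyGetD l (2*i) 0 * PySem.List.pyGetD l (2*i+1) 0)
      else l)
    (g := fun l i => PySem.List.pySetD l i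
      (PySem.List.pyGetD l (2*i) 0 * PySem.List.pyGetD l (2*i+1) 0))]
  simp only []
  rw [pvConvBase1 Aa n, pvConvBase1 mm n, pvConvBase2 Aa n hn, pvConvBase2 mm n hn]
  rw [pvDownConvA n, pvDownConvM n]
  rw [pvCConv]
  rw [pvConvOut1, pvConvOut2 _ _ _ n hn]
  rfl

lemma pvBaseL_length (x : List Int) (n : Nat) : (pvBaseL x n).length = 2*n := by
  unfold pvBaseL
  rw [pvFoldl_length _ _ (fun acc k _ => List.length_set ..),
    pvFoldl_length _ _ (fun acc k _ => List.length_set ..), List.length_replicate]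

lemma pvBaseL_getD (x : List Int) (n : Nat) (hn : 1 ≤ n) :
    ∀ j, j < 2*n → (pvBaseL x n).getD j 0 = if n ≤ j then x.getD (pvPos n j) 0 else 0 := by
  intro j hj
  obtain ⟨hL1, hL2, _⟩ := pvL_bounds n hn
  have hinlen : ((List.range' (pvL n) (2*n - pvL n)).foldl
      (fun acc k => acc.set k (x.getD (k - pvL n) 0))
      (List.replicate (2*n) (0:Int))).length = 2*n := by
    rw [pvFoldl_length _ _ (fun acc k _ => List.length_set ..), List.length_replicate]
  unfold pvBaseL
  rw [pvGetD_foldl_set, hinlen, pvGetD_foldl_set, List.length_replicate]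
  unfold pvPos
  by_cases h1 : n ≤ j ∧ j < pvL n
  · rw [if_pos ⟨by omega, by omega, by omega⟩, if_pos (by omega), if_neg (by omega)]
  · rw [if_neg (by omega)]
    by_cases h2 : pvL n ≤ j
    · rw [if_pos ⟨by omega, by omega, by omega⟩, if_pos (by omega), if_pos (by omega)]
    · rw [if_neg (by omega), List.getD_replicate _ (by omega), if_neg (by omega)]

lemma pvDownL_getD (x : List Int) (n : Nat) (hn : 1 ≤ n) :
    ∀ j, 1 ≤ j → j < 2*n → (pvDownL x n).getD j 0 = pvTreeVal x n j := by
  intro j hj1 hj2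
  unfold pvDownL
  exact pvDownM x n (n-1) (pvBaseL x n) (le_refl _) (pvBaseL_length x n)
    (fun j hjn hj2n => by rw [pvBaseL_getD x n hn j hj2n, if_pos hjn]
                          rw [pvTreeVal, dif_pos hjn, if_pos hj2n])
    j hj2 (by omega)

lemma pvDownLA_getD (x : List Int) (n : Nat) (hn : 1 ≤ n) :
    ∀ j, 1 ≤ j → j < 2*n → (n ≤ j ∨ j &&& (j+1) ≠ 0) →
      (pvDownLA x n).getD j 0 = pvTreeVal x n j := by
  intro j hj1 hj2 hg
  unfold pvDownLA
  exact pvDownA x n (n-1) (pvBaseL x n) (le_refl _) (pvBaseL_length x n)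
    (fun j hjn hj2n => by rw [pvBaseL_getD x n hn j hj2n, if_pos hjn]
                          rw [pvTreeVal, dif_pos hjn, if_pos hj2n])
    j hj2 (by omega) hg

lemma pvCL_getD (Aa mm : List Int) (n : Nat) (hn : 1 ≤ n) :
    ∀ j, j < 2*n → (pvCL Aa mm n).getD j 0 = pvSpecC Aa mm n j := by
  intro j hj
  unfold pvCL
  have h := pvCLoop Aa mm (pvDownLA Aa n) (pvDownL mm n) n hn
    (fun j h1 h2 => pvDownL_getD mm n hn j h1 h2)
    (fun j h1 h2 hg => pvDownLA_getD Aa n hn j h1 h2 hg)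
    (n-1) 1 ((List.replicate (2*n) 0).set 1 1) (le_refl _) (by omega)
    (by rw [List.length_set, List.length_replicate])
    (by
      intro j hj
      rw [pvGetD_set, List.length_replicate]
      by_cases h1 : j = 1
      · subst h1
        rw [if_pos ⟨rfl, by omega⟩, if_pos (by omega)]
        rw [pvSpecC, dif_neg (by omega), dif_pos rfl]
      · rw [if_neg (by tauto), List.getD_replicate _ (by omega)]
        by_cases h0 : j = 0
        · subst h0
          rw [if_pos (by omega), pvSpecC, dif_pos rfl]
        · rw [if_neg (by omega), if_neg h1])
    j hj
  rw [h, if_pos (by omega)]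

lemma pvOutL_length (Aa mm : List Int) (n : Nat) : (pvOutL Aa mm n).length = n := by
  unfold pvOutL
  rw [pvFoldl_length _ _ (fun acc k _ => List.length_set ..),
    pvFoldl_length _ _ (fun acc k _ => List.length_set ..), List.length_replicate]

lemma pvOutL_getD (Aa mm : List Int) (n : Nat) (hn : 1 ≤ n)
    (hmlen : mm.length = n) (hm : ∀ y ∈ mm, y ≠ 0) :
    ∀ p, p < n → (pvOutL Aa mm n).getD p 0
      = PySem.Int.mod (pvP Aa 0 (p+1)) (mm.getD p 0) := by
  intro p hp
  unfold pvOutL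
  exact pvOut_getD Aa mm (pvCL Aa mm n) (pvDownLA Aa n) (pvDownL mm n) n hn hmlen hm
    (pvCL_getD Aa mm n hn)
    (fun j h1 h2 hg => pvDownLA_getD Aa n hn j h1 h2 hg)
    (fun j h1 h2 => pvDownL_getD mm n hn j h1 h2)
    p hp

-- ===== VERDICT (by name: the statement is the Claim_ definition above) =====
theorem remainder_tree_spec : Claim_equal_remainder_tree := by
  unfold Claim_equal_remainder_tree
  intro A m _ hPre
  unfold Spec_remainder_tree
  obtain ⟨hlen, hm⟩ := hPre
  by_cases hn0 : A.length = 0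
  · have hA : A = [] := List.length_eq_zero_iff.mp hn0
    have hM : m = [] := List.length_eq_zero_iff.mp (by omega)
    subst hA; subst hM
    rfl
  · have hn : 1 ≤ A.length := by omega
    rw [pvPort_eq A m A.length hn rfl]
    obtain ⟨hBlen, hBval⟩ := pvAlt_char A m hlen
    apply List.ext_getElem
    · rw [pvOutL_length, hBlen]
    · intro i h1 h2
      have hi : i < A.length := by rw [pvOutL_length] at h1; exact h1
      rw [← List.getD_eq_getElem (pvOutL A m A.length) 0 h1]
      rw [pvOutL_getD A m A.length hn hlen.symm hm i hi]
      rw [hBval i hi]
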